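-- pv_equiv track=rewrite | github.com/pangan/IDRW | idrw/utils.py | int_list_to_hex
-- ===== SOURCE A (Python) =====
-- def int_list_to_hex(list_of_ints):
--     if len(list_of_ints) == 1:
--         ret_val = list_of_ints[0]
--         return ret_val
--     ret_value = list_of_ints[0] * 16 ** 2 + list_of_ints[1]
--     ret_list = [ret_value]
--     ret_list.extend(list_of_ints[2:])
--     return int_list_to_hex(ret_list)
-- ===== SOURCE B (Python) =====
-- from functools import reduce
--
-- def int_list_to_hex(list_of_ints):
--     return reduce(lambda acc, x: acc * 256 + x, list_of_ints, 0)
-- ===== Notes on version B (the rewrite author's own statement) =====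
-- stated objective: faster
-- what changed: A rebuilds a shorter list and recurses each step (quadratic list copying); B is a single left fold acc = acc*256 + x with no list construction.
import Mathlib
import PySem

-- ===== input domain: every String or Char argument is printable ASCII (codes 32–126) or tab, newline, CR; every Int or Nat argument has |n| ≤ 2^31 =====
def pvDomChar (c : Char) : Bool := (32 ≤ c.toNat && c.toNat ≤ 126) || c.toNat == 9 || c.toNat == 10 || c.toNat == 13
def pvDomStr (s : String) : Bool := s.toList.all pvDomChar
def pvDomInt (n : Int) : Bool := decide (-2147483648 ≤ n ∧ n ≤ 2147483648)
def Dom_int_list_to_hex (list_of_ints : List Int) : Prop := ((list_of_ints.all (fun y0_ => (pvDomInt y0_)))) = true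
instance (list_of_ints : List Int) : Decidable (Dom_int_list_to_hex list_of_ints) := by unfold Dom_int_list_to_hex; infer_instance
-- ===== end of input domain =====

-- B replaces A's rebuild-list-and-recurse loop by a single left fold acc*256 + x; return-value equivalence on nonempty lists.
-- ===== PORT A =====
-- A: if len == 1 return l[0]; else combine the first two into l[0]*16^2 + l[1] and recurse on the shortened list.
-- The `| [] => 0` arm is unreachable under Pre_ (Python raises IndexError on []).
def int_list_to_hex (list_of_ints : List Int) : Int :=
  if list_of_ints.length = 1 then
    (PySem.List.pyGet? list_of_ints 0).getD 0
  else
    match list_of_ints with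
    | a :: b :: rest => int_list_to_hex ((a * 16 ^ 2 + b) :: rest)
    | _ => 0
termination_by list_of_ints.length
decreasing_by simp

-- ===== PORT B =====
def int_list_to_hex_alt (list_of_ints : List Int) : Int :=
  list_of_ints.foldl (fun acc x => acc * 256 + x) 0

-- ===== PRECONDITION & SPEC =====
-- Pre_ excludes only the empty list, on which Python A raises IndexError.
def Pre_int_list_to_hex (list_of_ints : List Int) : Prop := list_of_ints ≠ []
instance (list_of_ints : List Int) : Decidable (Pre_int_list_to_hex list_of_ints) := by unfold Pre_int_list_to_hex; infer_instance
def pvWitness_int_list_to_hex : List Int := [1, 2, 3]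

def Spec_int_list_to_hex (list_of_ints : List Int) (out : Int) : Prop := out = int_list_to_hex_alt list_of_ints
instance (list_of_ints : List Int) (out : Int) : Decidable (Spec_int_list_to_hex list_of_ints out) := by unfold Spec_int_list_to_hex; infer_instance

-- ===== CLAIM (what is proved, stated in full; the proofs are below) =====
def Claim_equal_int_list_to_hex : Prop := ∀ (list_of_ints : List Int), Dom_int_list_to_hex list_of_ints → Pre_int_list_to_hex list_of_ints → Spec_int_list_to_hex list_of_ints (int_list_to_hex list_of_ints)

-- ===== LEMMAS AND PROOFS =====

-- A on a nonempty list equals the fold seeded with the head.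
theorem int_list_to_hex_cons (l : List Int) (a : Int) :
    int_list_to_hex (a :: l) = l.foldl (fun acc x => acc * 256 + x) a := by
  induction l generalizing a with
  | nil => simp [int_list_to_hex, PySem.List.pyGet?, PySem.List.pyIdx?]
  | cons b rest ih =>
      rw [int_list_to_hex]
      simp only [List.length_cons, List.foldl_cons]
      rw [if_neg (by simp), ih]
      norm_num

-- ===== VERDICT (by name: the statement is the Claim_ definition above) =====
theorem int_list_to_hex_spec : Claim_equal_int_list_to_hex := by
  intro l _ hpre
  match l with
  | [] => exact absurd rfl hpre
  | a :: rest =>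
      show int_list_to_hex (a :: rest) = int_list_to_hex_alt (a :: rest)
      rw [int_list_to_hex_cons]
      simp [int_list_to_hex_alt]
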